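-- pv_equiv track=rewrite | github.com/Aleksey-Kostov/Fundamentals-SoftUni-A.Kostov | lists_advanced_exercise/which_are_in.py | any_string_in
-- ===== SOURCE A (Python) =====
-- def any_string_in(first_string_list, second_string_list):
--     new_string_list = []
--     for first_string in first_string_list:
--         for second_string in second_string_list:
--             if first_string in second_string:
--                 new_string_list.append(first_string)
--                 break
--     return new_string_list
-- ===== SOURCE B (Python) =====
-- def any_string_in(first_string_list, second_string_list):
--     substrings = {
--         s[i:j]
--         for s in second_string_list
--         for i in range(len(s) + 1)
--         for j in range(i, len(s) + 1)
--     }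
--     return [f for f in first_string_list if f in substrings]
-- ===== Notes on version B (the rewrite author's own statement) =====
-- stated objective: faster
-- what changed: B precomputes the set of all substrings of the second list once and filters the first list by a single O(1) set-membership test each, instead of A's per-first-string scan over the second list with an inner substring search.
import Mathlib
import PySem

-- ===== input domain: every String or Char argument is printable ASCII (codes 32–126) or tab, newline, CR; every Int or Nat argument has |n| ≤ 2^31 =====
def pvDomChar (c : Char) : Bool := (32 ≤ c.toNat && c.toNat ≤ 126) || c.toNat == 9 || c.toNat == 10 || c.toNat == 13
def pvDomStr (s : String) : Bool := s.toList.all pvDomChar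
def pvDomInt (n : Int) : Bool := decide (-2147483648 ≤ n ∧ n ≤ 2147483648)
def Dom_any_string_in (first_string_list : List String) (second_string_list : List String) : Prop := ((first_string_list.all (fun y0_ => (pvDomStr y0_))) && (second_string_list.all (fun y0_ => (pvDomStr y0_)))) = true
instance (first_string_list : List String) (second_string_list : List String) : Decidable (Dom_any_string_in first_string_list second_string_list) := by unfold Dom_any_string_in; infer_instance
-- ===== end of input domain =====

-- B builds the set of all substrings of the second list once and filters the first list by
-- set membership, replacing A's inner scan over the second list; same return value (alternative).

-- ===== PORT A =====
-- inner 'for second_string in second_string_list: … break' loop of A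
def asiScan (first_string : String) (seconds : List String) (acc : List String) : List String :=
  match seconds with
  | [] => acc
  | s :: rest =>
    if PySem.Str.isIn first_string s then acc ++ [first_string]
    else asiScan first_string rest acc

def any_string_in (first_string_list : List String) (second_string_list : List String) : List String :=
  first_string_list.foldl (fun acc f => asiScan f second_string_list acc) []

-- ===== PORT B =====
-- the substrings s[i:j] contributed by one second string (B's inner two comprehension clauses)
def asiSubstrings (s : String) : List String :=
  (PySem.List.pyRange 0 (PySem.Str.len s + 1) 1).flatMap (fun i =>
    (PySem.List.pyRange i (PySem.Str.len s + 1) 1).map (fun j =>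
      PySem.Str.slice s (some i) (some j)))

def any_string_in_alt (first_string_list : List String) (second_string_list : List String) : List String :=
  let substrings : PySem.Set String :=
    PySem.Set.ofList (second_string_list.flatMap asiSubstrings)
  first_string_list.filter (fun f => substrings.contains f)

-- ===== PRECONDITION & SPEC =====
def Spec_any_string_in (first_string_list : List String) (second_string_list : List String) (out : List String) : Prop := out = any_string_in_alt first_string_list second_string_list
instance (first_string_list : List String) (second_string_list : List String) (out : List String) : Decidable (Spec_any_string_in first_string_list second_string_list out) := by unfold Spec_any_string_in; infer_instance

-- ===== CLAIM (what is proved, stated in full; the proofs are below) =====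
def Claim_equal_any_string_in : Prop := ∀ (first_string_list : List String) (second_string_list : List String), Dom_any_string_in first_string_list second_string_list → Spec_any_string_in first_string_list second_string_list (any_string_in first_string_list second_string_list)

-- ===== LEMMAS AND PROOFS =====

-- A's inner loop appends f exactly when some second string contains it
theorem asiScan_eq (f : String) (seconds : List String) (acc : List String) :
    asiScan f seconds acc =
      if seconds.any (fun s => PySem.Str.isIn f s) then acc ++ [f] else acc := by
  induction seconds with
  | nil => simp [asiScan]
  | cons s rest ih =>
    rw [asiScan, ih]
    simp only [List.any_cons, PySem.Str.isIn]
    by_cases h : PySem.Chars.isIn f.toList s.toList = true <;> simp [h]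

theorem foldl_append_if_eq_filter (p : String → Bool) (xs : List String) (acc : List String) :
    xs.foldl (fun acc f => if p f then acc ++ [f] else acc) acc = acc ++ xs.filter p := by
  induction xs generalizing acc with
  | nil => simp
  | cons x t ih =>
    by_cases h : p x = true <;> simp [List.foldl_cons, h, ih]

-- membership in B's substring list of one string = Python's 'f in s'
theorem mem_asiSubstrings (f s : String) :
    f ∈ asiSubstrings s ↔ PySem.Str.isIn f s = true := by
  rw [PySem.Str.isIn_iff_infix]
  constructor
  · intro hmem
    simp only [asiSubstrings, List.mem_flatMap, List.mem_map] at hmem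
    obtain ⟨i, hi, j, hj, hfs⟩ := hmem
    rw [PySem.List.mem_pyRange_one] at hi hj
    have h0i : 0 ≤ i := hi.1
    have hij : i ≤ j := hj.1
    have hslice : f.toList = (s.toList.drop i.toNat).take (j.toNat - i.toNat) := by
      rw [← hfs, PySem.Str.toList_slice, PySem.Chars.slice_eq_listSlice,
        PySem.List.slice_toNat _ h0i (le_trans h0i hij)]
    rw [hslice]
    exact ((List.take_prefix _ _).isInfix).trans ((List.drop_suffix _ _).isInfix)
  · rintro ⟨pre, suf, hs⟩
    simp only [asiSubstrings, List.mem_flatMap, List.mem_map]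
    have hlen : PySem.Str.len s = (s.toList.length : Int) := by
      simp [PySem.Str.len]
    refine ⟨(pre.length : Int), ?_, (pre.length + f.toList.length : Int), ?_, ?_⟩
    · rw [PySem.List.mem_pyRange_one, hlen]
      have hp : pre.length ≤ s.toList.length := by rw [← hs]; simp
      omega
    · rw [PySem.List.mem_pyRange_one, hlen]
      have hq : pre.length + f.toList.length ≤ s.toList.length := by rw [← hs]; simp
      omega
    · rw [← String.toList_inj, PySem.Str.toList_slice, PySem.Chars.slice_eq_listSlice]
      have : ((pre.length : Int) + (f.toList.length : Int)) = ((pre.length + f.toList.length : Nat) : Int) := by push_cast; ring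
      rw [this, PySem.List.slice_natCast, ← hs]
      simp

theorem contains_substrings (f : String) (seconds : List String) :
    (PySem.Set.ofList (seconds.flatMap asiSubstrings)).contains f =
      seconds.any (fun s => PySem.Str.isIn f s) := by
  rcases h : seconds.any (fun s => PySem.Str.isIn f s) with _ | _
  · rw [Bool.eq_false_iff]
    intro hc
    rw [PySem.Set.contains_iff, PySem.Set.mem_ofList, List.mem_flatMap] at hc
    obtain ⟨s, hs, hf⟩ := hc
    rw [mem_asiSubstrings] at hf
    simp only [List.any_eq_false] at h
    exact absurd hf (by simpa using h s hs)
  · rw [List.any_eq_true] at h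
    obtain ⟨s, hs, hf⟩ := h
    rw [PySem.Set.contains_iff, PySem.Set.mem_ofList, List.mem_flatMap]
    exact ⟨s, hs, (mem_asiSubstrings f s).2 hf⟩

-- ===== VERDICT (by name: the statement is the Claim_ definition above) =====
theorem any_string_in_spec : Claim_equal_any_string_in := by
  intro first second _
  unfold Spec_any_string_in any_string_in any_string_in_alt
  have hfold : first.foldl (fun acc f => asiScan f second acc) [] =
      first.foldl (fun acc f => if second.any (fun s => PySem.Str.isIn f s) then acc ++ [f] else acc) [] := by
    congr 1
    funext acc f
    exact asiScan_eq f second acc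
  rw [hfold, foldl_append_if_eq_filter]
  simp only [List.nil_append]
  congr 1
  funext f
  exact (contains_substrings f second).symm
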